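-- pv_equiv track=rewrite | github.com/Smemon19/cal-rag-agent | scripts/ingest_to_bigquery.py | smart_chunk_markdown
-- ===== SOURCE A (Python) =====
-- from typing import List, Dict, Any, Optional, Tuple
--
-- def smart_chunk_markdown(markdown: str, max_len: int = 1000, overlap_chars: int = 150) -> List[str]:
--     import re
--
--     def split_by_header(md: str, header_pattern: str) -> List[str]:
--         indices = [m.start() for m in re.finditer(header_pattern, md, re.MULTILINE)]
--         indices.append(len(md))
--         return [md[indices[i]:indices[i + 1]].strip()
--                 for i in range(len(indices) - 1)
--                 if md[indices[i]:indices[i + 1]].strip()]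
--
--     if not markdown:
--         return []
--
--     chunks: List[str] = []
--     for h1 in split_by_header(markdown, r'^# .+$'):
--         if len(h1) > max_len:
--             for h2 in split_by_header(h1, r'^## .+$'):
--                 if len(h2) > max_len:
--                     for h3 in split_by_header(h2, r'^### .+$'):
--                         if len(h3) > max_len:
--                             step = max(1, max_len - max(0, overlap_chars))
--                             i = 0
--                             while i < len(h3):
--                                 chunk = h3[i:i + max_len].strip()
--                                 if chunk:
--                                     chunks.append(chunk)
--                                 i += step
--                         else:
--                             chunks.append(h3)
--                 else:
--                     chunks.append(h2)
--         else:
--             chunks.append(h1)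
--     if not chunks:
--         chunks = [markdown]
--
--     final_chunks: List[str] = []
--     step = max(1, max_len - max(0, overlap_chars))
--     for c in chunks:
--         if len(c) > max_len:
--             i = 0
--             while i < len(c):
--                 piece = c[i:i + max_len].strip()
--                 if piece:
--                     final_chunks.append(piece)
--                 i += step
--         else:
--             final_chunks.append(c)
--     return [c for c in final_chunks if c]
-- ===== SOURCE B (Python) =====
-- # B: one recursive chunk(text, patterns) replaces A's three hard-coded nesting levels.
-- from typing import List
--
-- def smart_chunk_markdown(markdown: str, max_len: int = 1000, overlap_chars: int = 150) -> List[str]: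
--     import re
--
--     step = max(1, max_len - max(0, overlap_chars))
--
--     def split_by_header(md: str, header_pattern: str) -> List[str]:
--         idx = [m.start() for m in re.finditer(header_pattern, md, re.MULTILINE)] + [len(md)]
--         pieces = (md[idx[i]:idx[i + 1]].strip() for i in range(len(idx) - 1))
--         return [p for p in pieces if p]
--
--     def windows(text: str) -> List[str]:
--         out: List[str] = []
--         i = 0
--         while i < len(text):
--             piece = text[i:i + max_len].strip()
--             if piece:
--                 out.append(piece)
--             i += step
--         return out
--
--     def chunk(text: str, patterns: List[str]) -> List[str]:
--         if not patterns:
--             return windows(text)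
--         out: List[str] = []
--         for piece in split_by_header(text, patterns[0]):
--             if len(piece) > max_len:
--                 out.extend(chunk(piece, patterns[1:]))
--             else:
--                 out.append(piece)
--         return out
--
--     if not markdown:
--         return []
--     chunks = chunk(markdown, [r'^# .+$', r'^## .+$', r'^### .+$']) or [markdown]
--     final: List[str] = []
--     for c in chunks:
--         if len(c) > max_len:
--             final.extend(windows(c))
--         else:
--             final.append(c)
--     return [c for c in final if c]
-- ===== Notes on version B (the rewrite author's own statement) =====
-- stated objective: simpler
-- what changed: The three hard-coded header-nesting levels (h1/h2/h3 loops copy-pasted with deeper patterns) are replaced by one recursive helper chunk(text, patterns) that splits by patterns[0] and recurses with patterns[1:] on over-long pieces, with a single shared sliding-window helper.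
import Mathlib
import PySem

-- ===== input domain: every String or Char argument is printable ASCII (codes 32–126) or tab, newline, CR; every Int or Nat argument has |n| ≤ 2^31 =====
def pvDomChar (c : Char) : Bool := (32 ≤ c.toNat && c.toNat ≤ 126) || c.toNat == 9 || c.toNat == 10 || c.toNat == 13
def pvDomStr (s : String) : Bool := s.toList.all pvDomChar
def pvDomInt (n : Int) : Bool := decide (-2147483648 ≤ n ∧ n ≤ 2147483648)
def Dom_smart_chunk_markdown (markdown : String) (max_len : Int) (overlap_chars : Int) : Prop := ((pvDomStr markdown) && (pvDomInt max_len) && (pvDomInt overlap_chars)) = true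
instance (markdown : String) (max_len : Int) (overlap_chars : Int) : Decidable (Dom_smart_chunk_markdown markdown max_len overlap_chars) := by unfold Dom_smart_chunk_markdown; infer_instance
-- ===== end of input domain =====

-- B replaces A's three hard-coded header-nesting loops by ONE recursive helper chunk(text, patterns); same return value (objective: simpler decomposition, no speed claim).

-- ===== PORT A =====
-- Hand port of re.finditer(r'^<pre>.+$', md, re.MULTILINE) match starts: a match starts at p
-- iff p is a line start, md has the literal prefix `pre` at p, and at least one non-'\n'
-- character follows it ('.' excludes only '\n'; '\r' counts).  Exact on the ASCII domain.
def pvIsHeaderAt (md : List Char) (pre : List Char) (p : Nat) : Bool :=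
  (p == 0 || md.getD (p - 1) ' ' == '\n') && pre.isPrefixOf (md.drop p) &&
    (match md.drop (p + pre.length) with
     | [] => false
     | c :: _ => c != '\n')

def pvHeaderStarts (md : List Char) (pre : List Char) : List Nat :=
  (List.range md.length).filter (pvIsHeaderAt md pre)

-- split_by_header: indices = match starts ++ [len(md)]; stripped non-empty slices between consecutive indices
def pvSplitByHeader (md : List Char) (pre : List Char) : List (List Char) :=
  let idx := pvHeaderStarts md pre ++ [md.length]
  (List.range (idx.length - 1)).filterMap (fun i =>
    let s := PySem.Chars.strip (PySem.List.slice md (some ((idx.getD i 0 : Nat) : Int)) (some ((idx.getD (i + 1) 0 : Nat) : Int)))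
    if s.isEmpty then none else some s)

theorem pvStep_pos (a b : Int) : 1 ≤ (max 1 (a - max 0 b)).toNat := by
  have := le_max_left 1 (a - max 0 b); omega

-- the sliding-window while loop: i starts at 0, i += step, appends non-empty stripped slices to acc
def pvWinLoop (m : Int) (s : Nat) (hs : 1 ≤ s) (t : List Char) (i : Nat) (acc : List (List Char)) : List (List Char) :=
  if _h : i < t.length then
    pvWinLoop m s hs t (i + s)
      (if (PySem.Chars.strip (PySem.List.slice t (some (i : Int)) (some ((i : Int) + m)))).isEmpty then acc
       else acc ++ [PySem.Chars.strip (PySem.List.slice t (some (i : Int)) (some ((i : Int) + m)))])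
  else acc
termination_by t.length - i
decreasing_by omega

def smart_chunk_markdown (markdown : String) (max_len : Int) (overlap_chars : Int) : List String :=
  let md := markdown.toList
  if md.isEmpty then []
  else
    let step := (max 1 (max_len - max 0 overlap_chars)).toNat
    let chunks :=
      (pvSplitByHeader md ['#', ' ']).foldl (fun acc h1 =>
        if (h1.length : Int) > max_len then
          (pvSplitByHeader h1 ['#', '#', ' ']).foldl (fun acc h2 =>
            if (h2.length : Int) > max_len then
              (pvSplitByHeader h2 ['#', '#', '#', ' ']).foldl (fun acc h3 =>
                if (h3.length : Int) > max_len then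
                  pvWinLoop max_len step (pvStep_pos max_len overlap_chars) h3 0 acc
                else acc ++ [h3]) acc
            else acc ++ [h2]) acc
        else acc ++ [h1]) []
    let chunks := if chunks.isEmpty then [md] else chunks
    let final := chunks.foldl (fun acc c =>
      if (c.length : Int) > max_len then
        pvWinLoop max_len step (pvStep_pos max_len overlap_chars) c 0 acc
      else acc ++ [c]) []
    (final.filter (fun c => !c.isEmpty)).map String.ofList

-- ===== PORT B =====
-- chunk(text, patterns): no patterns left -> sliding window; else split by patterns[0] and
-- recurse (with patterns[1:]) only on pieces longer than max_len
def pvChunkB (m : Int) (s : Nat) (hs : 1 ≤ s) : List (List Char) → List Char → List (List Char)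
  | [], text => pvWinLoop m s hs text 0 []
  | p :: ps, text =>
      (pvSplitByHeader text p).foldl (fun acc piece =>
        if (piece.length : Int) > m then acc ++ pvChunkB m s hs ps piece
        else acc ++ [piece]) []

def smart_chunk_markdown_alt (markdown : String) (max_len : Int) (overlap_chars : Int) : List String :=
  let md := markdown.toList
  let step := (max 1 (max_len - max 0 overlap_chars)).toNat
  if md.isEmpty then []
  else
    let chunks0 := pvChunkB max_len step (pvStep_pos max_len overlap_chars)
      [['#', ' '], ['#', '#', ' '], ['#', '#', '#', ' ']] md
    let chunks := if chunks0.isEmpty then [md] else chunks0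
    let final := chunks.foldl (fun acc c =>
      if (c.length : Int) > max_len then
        acc ++ pvWinLoop max_len step (pvStep_pos max_len overlap_chars) c 0 []
      else acc ++ [c]) []
    (final.filter (fun c => !c.isEmpty)).map String.ofList

-- ===== PRECONDITION & SPEC =====
def Spec_smart_chunk_markdown (markdown : String) (max_len : Int) (overlap_chars : Int) (out : List String) : Prop := out = smart_chunk_markdown_alt markdown max_len overlap_chars
instance (markdown : String) (max_len : Int) (overlap_chars : Int) (out : List String) : Decidable (Spec_smart_chunk_markdown markdown max_len overlap_chars out) := by unfold Spec_smart_chunk_markdown; infer_instance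

-- ===== CLAIM (what is proved, stated in full; the proofs are below) =====
def Claim_equal_smart_chunk_markdown : Prop := ∀ (markdown : String) (max_len : Int) (overlap_chars : Int), Dom_smart_chunk_markdown markdown max_len overlap_chars → Spec_smart_chunk_markdown markdown max_len overlap_chars (smart_chunk_markdown markdown max_len overlap_chars)

-- ===== LEMMAS AND PROOFS =====

theorem pvWinLoop_acc (m : Int) (s : Nat) (hs : 1 ≤ s) (t : List Char) (i : Nat) (acc : List (List Char)) :
    pvWinLoop m s hs t i acc = acc ++ pvWinLoop m s hs t i [] := by
  suffices H : ∀ n i acc, t.length - i ≤ n →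
      pvWinLoop m s hs t i acc = acc ++ pvWinLoop m s hs t i [] from H _ i acc le_rfl
  intro n
  induction n with
  | zero =>
    intro i acc h
    conv_lhs => rw [pvWinLoop]
    conv_rhs => rw [pvWinLoop]
    rw [dif_neg (by omega : ¬ i < t.length), dif_neg (by omega : ¬ i < t.length)]
    simp
  | succ n ih =>
    intro i acc h
    by_cases hi : i < t.length
    · conv_lhs => rw [pvWinLoop]
      conv_rhs => rw [pvWinLoop]
      rw [dif_pos hi, dif_pos hi]
      split_ifs with hc
      · exact ih (i + s) acc (by omega)
      · rw [ih (i + s) (acc ++ [PySem.Chars.strip (PySem.List.slice t (some (i : Int)) (some ((i : Int) + m)))]) (by omega),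
          ih (i + s) ([] ++ [PySem.Chars.strip (PySem.List.slice t (some (i : Int)) (some ((i : Int) + m)))]) (by omega)]
        simp
    · conv_lhs => rw [pvWinLoop]
      conv_rhs => rw [pvWinLoop]
      rw [dif_neg hi, dif_neg hi]
      simp

theorem pvChunkB_cons (m : Int) (s : Nat) (hs : 1 ≤ s) (p : List Char) (ps : List (List Char)) (t : List Char) :
    pvChunkB m s hs (p :: ps) t =
      (pvSplitByHeader t p).flatMap (fun x => if (x.length : Int) > m then pvChunkB m s hs ps x else [x]) := by
  show List.foldl (fun acc piece =>
      if (piece.length : Int) > m then acc ++ pvChunkB m s hs ps piece else acc ++ [piece]) [] (pvSplitByHeader t p) = _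
  rw [PySem.List.foldl_congr_mem (pvSplitByHeader t p)
      (fun acc piece => if (piece.length : Int) > m then acc ++ pvChunkB m s hs ps piece else acc ++ [piece])
      (fun acc x => acc ++ (if (x.length : Int) > m then pvChunkB m s hs ps x else [x])) []
      (by intro acc x _; dsimp only; split_ifs <;> rfl),
    PySem.List.foldl_append_eq_flatMap]
  simp

theorem pvNestedA_eq (m : Int) (s : Nat) (hs : 1 ≤ s) (md : List Char) :
    (pvSplitByHeader md ['#', ' ']).foldl (fun acc h1 =>
        if (h1.length : Int) > m then
          (pvSplitByHeader h1 ['#', '#', ' ']).foldl (fun acc h2 =>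
            if (h2.length : Int) > m then
              (pvSplitByHeader h2 ['#', '#', '#', ' ']).foldl (fun acc h3 =>
                if (h3.length : Int) > m then pvWinLoop m s hs h3 0 acc
                else acc ++ [h3]) acc
            else acc ++ [h2]) acc
        else acc ++ [h1]) []
      = pvChunkB m s hs [['#', ' '], ['#', '#', ' '], ['#', '#', '#', ' ']] md := by
  have h3eq : ∀ (l : List (List Char)) (acc : List (List Char)),
      l.foldl (fun acc h3 => if (h3.length : Int) > m then pvWinLoop m s hs h3 0 acc else acc ++ [h3]) acc
        = acc ++ l.flatMap (fun x => if (x.length : Int) > m then pvChunkB m s hs [] x else [x]) := by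
    intro l acc
    rw [PySem.List.foldl_congr_mem l
        (fun acc h3 => if (h3.length : Int) > m then pvWinLoop m s hs h3 0 acc else acc ++ [h3])
        (fun acc x => acc ++ (if (x.length : Int) > m then pvChunkB m s hs [] x else [x])) acc
        (by intro acc x _; dsimp only; split_ifs with hgt
            · exact pvWinLoop_acc m s hs x 0 acc
            · rfl),
      PySem.List.foldl_append_eq_flatMap]
  have h2eq : ∀ (l : List (List Char)) (acc : List (List Char)),
      l.foldl (fun acc h2 =>
          if (h2.length : Int) > m then
            (pvSplitByHeader h2 ['#', '#', '#', ' ']).foldl (fun acc h3 =>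
              if (h3.length : Int) > m then pvWinLoop m s hs h3 0 acc else acc ++ [h3]) acc
          else acc ++ [h2]) acc
        = acc ++ l.flatMap (fun x => if (x.length : Int) > m then pvChunkB m s hs [['#', '#', '#', ' ']] x else [x]) := by
    intro l acc
    rw [PySem.List.foldl_congr_mem l
        (fun acc h2 =>
          if (h2.length : Int) > m then
            (pvSplitByHeader h2 ['#', '#', '#', ' ']).foldl (fun acc h3 =>
              if (h3.length : Int) > m then pvWinLoop m s hs h3 0 acc else acc ++ [h3]) acc
          else acc ++ [h2])
        (fun acc x => acc ++ (if (x.length : Int) > m then pvChunkB m s hs [['#', '#', '#', ' ']] x else [x])) acc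
        (by intro acc x _; dsimp only; split_ifs with hgt
            · rw [h3eq, pvChunkB_cons]
            · rfl),
      PySem.List.foldl_append_eq_flatMap]
  rw [PySem.List.foldl_congr_mem (pvSplitByHeader md ['#', ' '])
      (fun acc h1 =>
        if (h1.length : Int) > m then
          (pvSplitByHeader h1 ['#', '#', ' ']).foldl (fun acc h2 =>
            if (h2.length : Int) > m then
              (pvSplitByHeader h2 ['#', '#', '#', ' ']).foldl (fun acc h3 =>
                if (h3.length : Int) > m then pvWinLoop m s hs h3 0 acc
                else acc ++ [h3]) acc
            else acc ++ [h2]) acc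
        else acc ++ [h1])
      (fun acc x => acc ++ (if (x.length : Int) > m then pvChunkB m s hs [['#', '#', ' '], ['#', '#', '#', ' ']] x else [x])) []
      (by intro acc x _; dsimp only; split_ifs with hgt
          · rw [h2eq, pvChunkB_cons]
          · rfl),
    PySem.List.foldl_append_eq_flatMap, pvChunkB_cons]
  simp

theorem pvFinal_eq (m : Int) (s : Nat) (hs : 1 ≤ s) (l : List (List Char)) :
    l.foldl (fun acc c => if (c.length : Int) > m then pvWinLoop m s hs c 0 acc else acc ++ [c]) []
      = l.foldl (fun acc c => if (c.length : Int) > m then acc ++ pvWinLoop m s hs c 0 [] else acc ++ [c]) [] := by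
  rw [PySem.List.foldl_congr_mem l
      (fun acc c => if (c.length : Int) > m then pvWinLoop m s hs c 0 acc else acc ++ [c])
      (fun acc c => if (c.length : Int) > m then acc ++ pvWinLoop m s hs c 0 [] else acc ++ [c]) []
      (by intro acc x _; dsimp only; split_ifs with hgt
          · exact pvWinLoop_acc m s hs x 0 acc
          · rfl)]

-- ===== VERDICT (by name: the statement is the Claim_ definition above) =====
theorem smart_chunk_markdown_spec : Claim_equal_smart_chunk_markdown := by
  intro markdown max_len overlap_chars _
  unfold Spec_smart_chunk_markdown smart_chunk_markdown smart_chunk_markdown_alt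
  by_cases h : markdown.toList.isEmpty
  · simp only [h, if_pos]
  · simp only [h, if_neg, Bool.false_eq_true, not_false_eq_true]
    rw [pvNestedA_eq max_len _ (pvStep_pos max_len overlap_chars) markdown.toList,
      pvFinal_eq max_len _ (pvStep_pos max_len overlap_chars)]
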